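-- pv_equiv track=rewrite | github.com/Contomo/VoronTC-backupConfgis | printer_data/config/develop/tool_leds/status_leds.py | _parse_rules_block
-- ===== SOURCE A (Python) =====
-- from collections import OrderedDict
--
-- def _parse_rules_block(val):
--     rules = OrderedDict()
--     order = []
--     last_key = None
--     if not val:
--         return {}, []
--     for raw in val.splitlines():
--         s = raw.strip()
--         if not s:
--             continue
--         if ':' in s:
--             key, rest = s.split(':', 1)
--             key = key.strip()
--             rest = rest.strip()
--             if key not in rules:
--                 rules[key] = []
--                 order.append(key)
--             last_key = key
--             if rest:
--                 _append_effect_line(rules[key], rest)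
--         elif last_key:
--             _append_effect_line(rules[last_key], s)
--     return dict(rules), order
--
-- def _append_effect_line(dst_list, rest):
--     name, extras = None, ""
--     if rest.lower().startswith("index_led_effect "):
--         parts = rest.split(None, 2)
--         name   = parts[1] if len(parts) >= 2 else None
--         extras = parts[2] if len(parts) >= 3 else ""
--     else:
--         parts = rest.split(None, 1)
--         name   = parts[0]
--         extras = parts[1] if len(parts) >= 2 else ""
--     if name:
--         dst_list.append({'name': name.strip(), 'extras': extras.strip()})
-- ===== SOURCE B (Python) =====
-- def _parse_rules_block(val):
--     if not val:
--         return {}, []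
--     # Phase 1: resolve continuation lines into a flat event list of (key, rest-or-None).
--     events = []
--     last_key = None
--     for raw in val.splitlines():
--         s = raw.strip()
--         if not s:
--             continue
--         if ':' in s:
--             key, rest = s.split(':', 1)
--             key = key.strip()
--             rest = rest.strip()
--             events.append((key, rest if rest else None))
--             last_key = key
--         elif last_key:
--             events.append((last_key, s))
--     # Phase 2: group the events by key (first-seen order) and parse the effect strings.
--     rules, order = {}, []
--     for key, rest in events:
--         if key not in rules:
--             rules[key] = []
--             order.append(key)
--         if rest is not None:
--             rules[key].extend(_effect(rest))
--     return rules, order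
--
-- def _effect(rest):
--     # uniform tokenizer: name is token number k, extras the remainder after it
--     k = 2 if rest.lower().startswith("index_led_effect ") else 1
--     parts = rest.split(None, k)
--     name = parts[k - 1] if len(parts) >= k else None
--     extras = parts[k] if len(parts) > k else ""
--     if not name:
--         return []
--     return [{'name': name.strip(), 'extras': extras.strip()}]
-- ===== Notes on version B (the rewrite author's own statement) =====
-- stated objective: alternative
-- what changed: B replaces A's single stateful pass (which eagerly parses each effect line into the per-key lists it mutates in place) by two staged passes: phase 1 resolves the continuation/last_key logic into a flat list of (key, raw-effect-string) events, phase 2 groups those events by key in first-seen order and parses each stored string with a uniform tokenizer helper (k = 1 or 2 leading tokens) instead of A's duplicated split branches.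
import Mathlib
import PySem

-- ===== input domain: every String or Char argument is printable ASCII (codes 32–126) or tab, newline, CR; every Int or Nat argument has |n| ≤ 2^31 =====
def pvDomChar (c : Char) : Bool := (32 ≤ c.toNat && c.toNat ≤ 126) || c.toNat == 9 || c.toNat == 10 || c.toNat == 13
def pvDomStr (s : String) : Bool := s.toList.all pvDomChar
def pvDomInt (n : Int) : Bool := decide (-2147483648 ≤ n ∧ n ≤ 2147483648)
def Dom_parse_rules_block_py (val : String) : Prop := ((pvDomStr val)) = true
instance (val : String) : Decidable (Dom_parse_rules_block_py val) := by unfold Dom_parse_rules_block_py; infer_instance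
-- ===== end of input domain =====

-- B re-decomposes A's single stateful pass into two staged passes: phase 1 resolves the
-- continuation lines into a flat (key, effect-string?) event list, phase 2 groups the events
-- by key and parses each effect string with a uniform tokenizer (objective: alternative).

-- ===== PORT A =====
-- _append_effect_line(dst_list, rest): appends at most one {'name','extras'} dict to dst_list.
-- A only calls it with a non-empty stripped `rest`, so parts[0] in the else-branch never raises;
-- the `none` fallthrough below is unreachable on A's calls.
def pvAppendEffectLine (dst : List (List (String × String))) (rest : String) :
    List (List (String × String)) :=
  let np : Option String × String :=
    if PySem.Str.startswith (PySem.Str.lower rest) "index_led_effect " then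
      let parts := PySem.Str.split₀Max rest 2
      (if 2 ≤ parts.length then parts[1]? else none,
       if 3 ≤ parts.length then parts.getD 2 "" else "")
    else
      let parts := PySem.Str.split₀Max rest 1
      (parts[0]?, if 2 ≤ parts.length then parts.getD 1 "" else "")
  match np with
  | (some name, extras) =>
      if name ≠ "" then
        dst ++ [[("name", PySem.Str.strip name), ("extras", PySem.Str.strip extras)]]
      else dst
  | (none, _) => dst

-- the body of A's for-loop, over the state (rules, order, last_key)
def pvStepA (st : PySem.Dict String (List (List (String × String))) × List String × Option String)
    (raw : String) :
    PySem.Dict String (List (List (String × String))) × List String × Option String :=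
  let s := PySem.Str.strip raw
  if s = "" then st
  else if PySem.Str.isIn ":" s then
    let parts := (PySem.Str.splitMax? s ":" 1).getD []   -- ':' ∈ s, so splitMax? is some
    let key := PySem.Str.strip (parts.getD 0 "")
    let rest := PySem.Str.strip (parts.getD 1 "")
    let ro : PySem.Dict String (List (List (String × String))) × List String :=
      if st.1.contains key then (st.1, st.2.1) else (st.1.insert key [], st.2.1 ++ [key])
    if rest ≠ "" then (ro.1.modify key [] (fun l => pvAppendEffectLine l rest), ro.2, some key)
    else (ro.1, ro.2, some key)
  else
    match st.2.2 with
    | some k =>                                          -- `elif last_key:` (falsy for "" too)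
        if k ≠ "" then (st.1.modify k [] (fun l => pvAppendEffectLine l s), st.2.1, st.2.2)
        else st
    | none => st

def parse_rules_block_py (val : String) :
    (List (String × List (List (String × String)))) × List String :=
  if val = "" then ([], [])
  else
    let fin := (PySem.Str.splitlines val).foldl pvStepA (PySem.Dict.empty, [], none)
    (fin.1.items, fin.2.1)

-- ===== PORT B =====
-- _effect(rest): parses one effect string with a uniform tokenizer (name = token k, extras after)
def pvEffect (rest : String) : List (List (String × String)) :=
  let k : Nat :=
    if PySem.Str.startswith (PySem.Str.lower rest) "index_led_effect " then 2 else 1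
  let parts := PySem.Str.split₀Max rest k
  let name : Option String := if k ≤ parts.length then parts[k - 1]? else none
  let extras : String := if k < parts.length then parts.getD k "" else ""
  match name with
  | some n =>
      if n ≠ "" then [[("name", PySem.Str.strip n), ("extras", PySem.Str.strip extras)]] else []
  | none => []

-- phase 1: structural recursion on the lines, carrying last_key, emitting (key, rest?) events
def pvPhase1 : List String → Option String → List (String × Option String)
  | [], _ => []
  | raw :: more, lk =>
    let s := PySem.Str.strip raw
    if s = "" then pvPhase1 more lk
    else if PySem.Str.isIn ":" s then
      let parts := (PySem.Str.splitMax? s ":" 1).getD []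
      let key := PySem.Str.strip (parts.getD 0 "")
      let rest := PySem.Str.strip (parts.getD 1 "")
      (key, if rest ≠ "" then some rest else none) :: pvPhase1 more (some key)
    else
      match lk with
      | some k => if k ≠ "" then (k, some s) :: pvPhase1 more lk else pvPhase1 more lk
      | none => pvPhase1 more lk

-- phase 2: one grouping step per event, over the state (rules, order)
def pvStep2 (st : PySem.Dict String (List (List (String × String))) × List String)
    (ev : String × Option String) :
    PySem.Dict String (List (List (String × String))) × List String :=
  let ro := if st.1.contains ev.1 then st else (st.1.insert ev.1 [], st.2 ++ [ev.1])
  match ev.2 with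
  | some rest => (ro.1.modify ev.1 [] (fun l => l ++ pvEffect rest), ro.2)
  | none => ro

def parse_rules_block_py_alt (val : String) :
    (List (String × List (List (String × String)))) × List String :=
  if val = "" then ([], [])
  else
    let evs := pvPhase1 (PySem.Str.splitlines val) none
    let fin := evs.foldl pvStep2 (PySem.Dict.empty, [])
    (fin.1.items, fin.2)

-- ===== PRECONDITION & SPEC =====
def Spec_parse_rules_block_py (val : String) (out : (List (String × List (List (String × String)))) × List String) : Prop := out = parse_rules_block_py_alt val
instance (val : String) (out : (List (String × List (List (String × String)))) × List String) : Decidable (Spec_parse_rules_block_py val out) := by unfold Spec_parse_rules_block_py; infer_instance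

-- ===== CLAIM (what is proved, stated in full; the proofs are below) =====
def Claim_equal_parse_rules_block_py : Prop := ∀ (val : String), Dom_parse_rules_block_py val → Spec_parse_rules_block_py val (parse_rules_block_py val)

-- ===== LEMMAS AND PROOFS =====

-- A's in-place append is B's uniform effect parser appended.
theorem pvAppendEffectLine_eq (dst : List (List (String × String))) (rest : String) :
    pvAppendEffectLine dst rest = dst ++ pvEffect rest := by
  unfold pvAppendEffectLine pvEffect
  by_cases hp : PySem.Str.startswith (PySem.Str.lower rest) "index_led_effect " = true
  · simp only [hp, if_true]
    generalize PySem.Str.split₀Max rest 2 = parts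
    simp only [show ((2:Nat) < parts.length) = (3 ≤ parts.length) from propext (by omega)]
    cases h : (if 2 ≤ parts.length then parts[1]? else none) with
    | none => simp
    | some n => by_cases hn : n = "" <;> simp [hn]
  · simp only [hp, Bool.false_eq_true, if_false]
    generalize PySem.Str.split₀Max rest 1 = parts
    simp only [show ((1:Nat) < parts.length) = (2 ≤ parts.length) from propext (by omega)]
    cases h : parts[0]? with
    | none =>
      have hnil : parts = [] := by
        cases parts with
        | nil => rfl
        | cons a t => simp at h
      simp [hnil]
    | some n =>
      have hlen : 1 ≤ parts.length := by
        cases parts with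
        | nil => simp at h
        | cons a t => simp
      by_cases hn : n = "" <;> simp [hn, hlen]

-- appending via A's helper IS appending B's parsed effects
theorem pvModify_eq (d : PySem.Dict String (List (List (String × String)))) (k rest : String) :
    d.modify k [] (fun l => pvAppendEffectLine l rest) =
      d.modify k [] (fun l => l ++ pvEffect rest) := by
  congr 1
  funext l
  exact pvAppendEffectLine_eq l rest

-- the staged simulation: A's single fold over the lines computes, in its first two components,
-- B's phase-2 fold over the phase-1 event list, whenever last_key (if set and truthy) is present
theorem pvSim (lines : List String)
    (d : PySem.Dict String (List (List (String × String)))) (ord : List String)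
    (lk : Option String)
    (hlk : ∀ k, lk = some k → k ≠ "" → d.contains k = true) :
    ((lines.foldl pvStepA (d, ord, lk)).1, (lines.foldl pvStepA (d, ord, lk)).2.1) =
      (pvPhase1 lines lk).foldl pvStep2 (d, ord) := by
  induction lines generalizing d ord lk with
  | nil => rfl
  | cons raw more ih =>
    simp only [List.foldl_cons, pvPhase1]
    by_cases hs : PySem.Str.strip raw = ""
    · simp only [pvStepA, hs, reduceIte]
      exact ih d ord lk hlk
    · by_cases hc : PySem.Str.isIn ":" (PySem.Str.strip raw) = true
      · simp only [pvStepA, hs, hc, if_true, reduceIte]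
        generalize PySem.Str.strip (((PySem.Str.splitMax? (PySem.Str.strip raw) ":" 1).getD []).getD 0 "") = key
        generalize PySem.Str.strip (((PySem.Str.splitMax? (PySem.Str.strip raw) ":" 1).getD []).getD 1 "") = rest
        by_cases hck : d.contains key = true
        · simp only [hck, if_true]
          by_cases hr : rest = ""
          · simp only [hr, ne_eq, not_true_eq_false, if_false, List.foldl_cons]
            have hstep : pvStep2 (d, ord) (key, none) = (d, ord) := by
              simp [pvStep2, hck]
            rw [hstep]
            exact ih d ord (some key) (fun k hk _ => by cases hk; exact hck)
          · simp only [hr, ne_eq, not_false_eq_true, if_true, List.foldl_cons]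
            have hstep : pvStep2 (d, ord) (key, some rest) =
                (d.modify key [] (fun l => l ++ pvEffect rest), ord) := by
              simp [pvStep2, hck]
            rw [hstep, pvModify_eq]
            refine ih _ ord (some key) (fun k hk _ => ?_)
            cases hk
            simp [PySem.Dict.contains_modify, hck]
        · simp only [hck, Bool.false_eq_true, if_false]
          have hcins : (d.insert key ([] : List (List (String × String)))).contains key = true := by
            simp
          by_cases hr : rest = ""
          · simp only [hr, ne_eq, not_true_eq_false, if_false, List.foldl_cons]
            have hstep : pvStep2 (d, ord) (key, none) = (d.insert key [], ord ++ [key]) := by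
              simp [pvStep2, hck]
            rw [hstep]
            exact ih _ _ (some key) (fun k hk _ => by cases hk; exact hcins)
          · simp only [hr, ne_eq, not_false_eq_true, if_true, List.foldl_cons]
            have hstep : pvStep2 (d, ord) (key, some rest) =
                ((d.insert key []).modify key [] (fun l => l ++ pvEffect rest), ord ++ [key]) := by
              simp [pvStep2, hck]
            rw [hstep, pvModify_eq]
            refine ih _ _ (some key) (fun k hk _ => ?_)
            cases hk
            simp [PySem.Dict.contains_modify, hcins]
      · simp only [Bool.not_eq_true] at hc
        simp only [pvStepA, hc, if_neg hs, Bool.false_eq_true, if_false]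
        cases lk with
        | none => exact ih d ord none hlk
        | some k =>
          by_cases hk : k = ""
          · simp only [hk, ne_eq, not_true_eq_false, if_false]
            exact ih d ord (some "") (fun k' hk' hne => by cases hk'; exact absurd rfl hne)
          · have hck := hlk k rfl hk
            simp only [hk, ne_eq, not_false_eq_true, if_true, List.foldl_cons]
            have hstep : pvStep2 (d, ord) (k, some (PySem.Str.strip raw)) =
                (d.modify k [] (fun l => l ++ pvEffect (PySem.Str.strip raw)), ord) := by
              simp [pvStep2, hck]
            rw [hstep, pvModify_eq]
            refine ih _ ord (some k) (fun k' hk' _ => ?_)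
            cases hk'
            simp [PySem.Dict.contains_modify, hck]

-- ===== VERDICT (by name: the statement is the Claim_ definition above) =====
theorem parse_rules_block_py_spec : Claim_equal_parse_rules_block_py := by
  intro val _
  unfold Spec_parse_rules_block_py parse_rules_block_py parse_rules_block_py_alt
  by_cases hv : val = ""
  · simp [hv]
  · simp only [hv, if_false]
    have h0 : ∀ k, (none : Option String) = some k → k ≠ "" →
        (PySem.Dict.empty :
          PySem.Dict String (List (List (String × String)))).contains k = true := by
      intro k hk; cases hk
    have := pvSim (PySem.Str.splitlines val) PySem.Dict.empty [] none h0
    rw [Prod.ext_iff]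
    exact ⟨congrArg Prod.fst this ▸ rfl, congrArg Prod.snd this ▸ rfl⟩
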